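-- pv_equiv track=rewrite | github.com/NoDanCoder/holbertonschool-interview | 0x00-lockboxes/0-lockboxes.py | openBox
-- ===== SOURCE A (Python) =====
-- def openBox(boxes, box, memo):
--     """ itertate recursively truough list of boxes
--         and save them on memo set
--     """
--
--     try:
--         keys = boxes[box]
--         if type(keys) != list:
--             memo.add(-1)
--             return memo
--         memo.add(box)
--     except IndexError:
--         return memo
--
--     for key in keys:
--         if type(key) != int:
--             memo.add(-1)
--             return memo
--         if key not in memo:
--             openBox(boxes, key, memo)
--
--     return memo
-- ===== SOURCE B (Python) =====
-- def openBox(boxes, box, memo):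
--     """Iterative DFS with an explicit stack instead of recursion (mutates and
--     returns memo, like the original)."""
--     n = len(boxes)
--     if not -n <= box < n:
--         return memo
--     memo.add(box)
--     stack = list(reversed(boxes[box]))
--     while stack:
--         b = stack.pop()
--         if b in memo:
--             continue
--         if -n <= b < n:
--             memo.add(b)
--             stack.extend(reversed(boxes[b]))
--     return memo
-- ===== Notes on version B (the rewrite author's own statement) =====
-- stated objective: alternative
-- what changed: A's recursive DFS is replaced by an iterative DFS that manages an explicit stack of pending keys (pushing each box's keys reversed and popping from the end), mutating the same memo set; the recursion disappears entirely.
import Mathlib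
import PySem

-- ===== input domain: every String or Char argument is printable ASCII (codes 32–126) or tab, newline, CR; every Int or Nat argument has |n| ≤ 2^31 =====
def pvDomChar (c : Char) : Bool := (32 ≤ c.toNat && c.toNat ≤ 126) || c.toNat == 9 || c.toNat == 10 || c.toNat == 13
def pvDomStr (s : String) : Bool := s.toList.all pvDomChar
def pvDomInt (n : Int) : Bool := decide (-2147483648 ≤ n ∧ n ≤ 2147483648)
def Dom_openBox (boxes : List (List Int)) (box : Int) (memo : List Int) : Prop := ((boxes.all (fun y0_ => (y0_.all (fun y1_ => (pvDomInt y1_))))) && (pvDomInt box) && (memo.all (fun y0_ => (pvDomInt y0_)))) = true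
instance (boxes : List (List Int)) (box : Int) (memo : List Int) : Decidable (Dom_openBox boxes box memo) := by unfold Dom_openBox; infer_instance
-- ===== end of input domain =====

-- B replaces A's recursion by an iterative DFS over an explicit stack (same return value;
-- both Pythons mutate the `memo` set in place and return it — the proved equivalence is
-- about the returned value, which here coincides with the mutation).
-- In the typed domain (boxes : list of lists of ints, memo : set of ints) the Python
-- `type(...) != list` / `type(...) != int` branches of A are unreachable and are not ported.

-- ===== PORT A =====
-- A is recursive; recursion depth is bounded because memo only grows, so the port uses a
-- fuel counter (a totality guard only; `2 * boxes.length + 2` is proved sufficient below).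
mutual
def openBoxF : Nat → List (List Int) → Int → List Int → List Int
  | 0, _, _, memo => memo
  | f + 1, boxes, box, memo =>
    match PySem.List.pyGet? boxes box with      -- keys = boxes[box]  (none = IndexError)
    | none => memo                              -- except IndexError: return memo
    | some keys => openBoxKeys f boxes keys (PySem.Set.add memo box)   -- memo.add(box)
termination_by f _ _ _ => (f, 0)
def openBoxKeys : Nat → List (List Int) → List Int → List Int → List Int
  | _, _, [], memo => memo
  | f, boxes, k :: ks, memo =>
    if k ∈ memo then openBoxKeys f boxes ks memo
    else openBoxKeys f boxes ks (openBoxF f boxes k memo)   -- if key not in memo: openBox(...)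
termination_by f _ ks _ => (f, ks.length + 1)
end

def openBox (boxes : List (List Int)) (box : Int) (memo : List Int) : List Int :=
  openBoxF (2 * boxes.length + 2) boxes box memo

-- ===== PORT B =====
-- helper measure for the loop's termination: how many valid box indices are not yet in memo
def validBoxes (boxes : List (List Int)) : List Int :=
  (List.range (2 * boxes.length)).map (fun i : Nat => (i : Int) - (boxes.length : Int))

def unseen (boxes : List (List Int)) (memo : List Int) : Nat :=
  (validBoxes boxes).countP (fun b => decide (b ∉ memo))

theorem mem_validBoxes {boxes : List (List Int)} {b : Int} :
    b ∈ validBoxes boxes ↔ -(boxes.length : Int) ≤ b ∧ b < boxes.length := by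
  simp only [validBoxes, List.mem_map, List.mem_range]
  constructor
  · rintro ⟨i, hi, rfl⟩; omega
  · intro h; exact ⟨(b + boxes.length).toNat, by omega, by omega⟩

theorem countP_notMem_add_lt {l memo : List Int} {b : Int}
    (hv : b ∈ l) (hm : b ∉ memo) :
    l.countP (fun x => decide (x ∉ PySem.Set.add memo b)) <
      l.countP (fun x => decide (x ∉ memo)) := by
  induction l with
  | nil => cases hv
  | cons a t ih =>
    have hle : t.countP (fun x => decide (x ∉ PySem.Set.add memo b)) ≤
        t.countP (fun x => decide (x ∉ memo)) := by
      apply List.countP_mono_left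
      intro x _ hx
      simp only [decide_eq_true_eq, PySem.Set.mem_add] at hx ⊢
      exact fun hxm => hx (Or.inl hxm)
    rcases List.mem_cons.mp hv with rfl | ha
    · rw [List.countP_cons_of_neg, List.countP_cons_of_pos]
      · omega
      · simp [hm]
      · simp [PySem.Set.mem_add]
    · have := ih ha
      simp only [List.countP_cons]
      have hd : (if decide (a ∉ PySem.Set.add memo b) = true then 1 else 0) ≤
          (if decide (a ∉ memo) = true then 1 else 0) := by
        by_cases h : a ∈ PySem.Set.add memo b
        · simp [h]
        · have hnm : a ∉ memo := fun hc => h (by simp [PySem.Set.mem_add, hc])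
          simp [h, hnm]
      omega

theorem unseen_add_lt {boxes : List (List Int)} {memo : List Int} {b : Int}
    (hv : b ∈ validBoxes boxes) (hm : b ∉ memo) :
    unseen boxes (PySem.Set.add memo b) < unseen boxes memo :=
  countP_notMem_add_lt hv hm

theorem valid_of_pyGet?_some {boxes : List (List Int)} {b : Int} {keys : List Int}
    (h : PySem.List.pyGet? boxes b = some keys) : b ∈ validBoxes boxes := by
  have hr : PySem.Raise.InRange boxes.length b := by
    by_contra hc
    rw [(PySem.List.pyGet?_eq_none_iff boxes b).mpr hc] at h
    cases h
  rw [mem_validBoxes]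
  simpa [PySem.Raise.InRange] using hr

-- The stack is the Lean list with head = Python's stack top (Python pushes reversed(keys)
-- and pops from the end, i.e. it consumes keys in order; here that is `keys ++ rest`).
def loopB (boxes : List (List Int)) (stack : List Int) (memo : List Int) : List Int :=
  match stack with
  | [] => memo
  | b :: rest =>
    if hmem : b ∈ memo then loopB boxes rest memo
    else
      match hget : PySem.List.pyGet? boxes b with
      | none => loopB boxes rest memo
      | some keys => loopB boxes (keys ++ rest) (PySem.Set.add memo b)
termination_by (unseen boxes memo, stack.length)
decreasing_by
  · exact Prod.Lex.right _ (by simp)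
  · exact Prod.Lex.right _ (by simp)
  · exact Prod.Lex.left _ _ (unseen_add_lt (valid_of_pyGet?_some hget) hmem)

def openBox_alt (boxes : List (List Int)) (box : Int) (memo : List Int) : List Int :=
  match PySem.List.pyGet? boxes box with
  | none => memo                                      -- if not -n <= box < n: return memo
  | some keys => loopB boxes keys (PySem.Set.add memo box)

-- ===== PRECONDITION & SPEC =====
def Spec_openBox (boxes : List (List Int)) (box : Int) (memo : List Int) (out : List Int) : Prop := out = openBox_alt boxes box memo
instance (boxes : List (List Int)) (box : Int) (memo : List Int) (out : List Int) : Decidable (Spec_openBox boxes box memo out) := by unfold Spec_openBox; infer_instance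

-- ===== CLAIM (what is proved, stated in full; the proofs are below) =====
def Claim_equal_openBox : Prop := ∀ (boxes : List (List Int)) (box : Int) (memo : List Int), Dom_openBox boxes box memo → Spec_openBox boxes box memo (openBox boxes box memo)

-- ===== LEMMAS AND PROOFS =====

theorem unseen_mono {boxes : List (List Int)} {memo memo' : List Int}
    (h : ∀ x ∈ memo, x ∈ memo') : unseen boxes memo' ≤ unseen boxes memo := by
  unfold unseen
  apply List.countP_mono_left
  intro x _ hx
  simp only [decide_eq_true_eq] at hx ⊢
  exact fun hm => hx (h x hm)


-- memo only grows through the recursion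
theorem mem_openBoxF_and_keys (f : Nat) :
    (∀ boxes box memo x, x ∈ memo → x ∈ openBoxF f boxes box memo) ∧
    (∀ (boxes : List (List Int)) ks memo x, x ∈ memo → x ∈ openBoxKeys f boxes ks memo) := by
  induction f with
  | zero =>
    have hF : ∀ (boxes : List (List Int)) (box : Int) (memo : List Int) x,
        x ∈ memo → x ∈ openBoxF 0 boxes box memo := by
      intro boxes box memo x hx; simpa [openBoxF] using hx
    refine ⟨hF, ?_⟩
    intro boxes ks
    induction ks with
    | nil => intro memo x hx; simpa [openBoxKeys] using hx
    | cons k ks ih =>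
      intro memo x hx
      simp only [openBoxKeys]
      split
      · exact ih memo x hx
      · exact ih _ x (hF boxes k memo x hx)
  | succ f ih =>
    have hF : ∀ (boxes : List (List Int)) (box : Int) (memo : List Int) x,
        x ∈ memo → x ∈ openBoxF (f + 1) boxes box memo := by
      intro boxes box memo x hx
      simp only [openBoxF]
      split
      · exact hx
      · exact ih.2 boxes _ _ x (by simp [PySem.Set.mem_add, hx])
    refine ⟨hF, ?_⟩
    intro boxes ks
    induction ks with
    | nil => intro memo x hx; simpa [openBoxKeys] using hx
    | cons k ks ihk =>
      intro memo x hx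
      simp only [openBoxKeys]
      split
      · exact ihk memo x hx
      · exact ihk _ x (hF boxes k memo x hx)

-- unfolding lemmas for the loop
theorem loopB_nil (boxes : List (List Int)) (memo : List Int) :
    loopB boxes [] memo = memo := by rw [loopB]

theorem loopB_cons_mem {boxes : List (List Int)} {b : Int} {rest memo : List Int}
    (h : b ∈ memo) : loopB boxes (b :: rest) memo = loopB boxes rest memo := by
  rw [loopB]; simp [h]

theorem loopB_cons_none {boxes : List (List Int)} {b : Int} {rest memo : List Int}
    (h1 : b ∉ memo) (h2 : PySem.List.pyGet? boxes b = none) :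
    loopB boxes (b :: rest) memo = loopB boxes rest memo := by
  rw [loopB]; rw [dif_neg h1]; split <;> simp_all

theorem loopB_cons_some {boxes : List (List Int)} {b : Int} {rest memo keys : List Int}
    (h1 : b ∉ memo) (h2 : PySem.List.pyGet? boxes b = some keys) :
    loopB boxes (b :: rest) memo = loopB boxes (keys ++ rest) (PySem.Set.add memo b) := by
  rw [loopB]; rw [dif_neg h1]; split <;> simp_all

-- simulation: the explicit-stack loop computes exactly what the fueled recursion computes
theorem sim (f : Nat) :
    (∀ boxes box memo rest, box ∉ memo → unseen boxes memo + 1 ≤ f →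
      loopB boxes rest (openBoxF f boxes box memo) = loopB boxes (box :: rest) memo) ∧
    (∀ (boxes : List (List Int)) ks memo rest, unseen boxes memo + 1 ≤ f →
      loopB boxes rest (openBoxKeys f boxes ks memo) = loopB boxes (ks ++ rest) memo) := by
  induction f with
  | zero => exact ⟨fun _ _ _ _ _ h => by omega, fun _ _ _ _ h => by omega⟩
  | succ f ih =>
    have hF : ∀ (boxes : List (List Int)) (box : Int) memo rest, box ∉ memo →
        unseen boxes memo + 1 ≤ f + 1 →
        loopB boxes rest (openBoxF (f + 1) boxes box memo) = loopB boxes (box :: rest) memo := by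
      intro boxes box memo rest hbox hfuel
      simp only [openBoxF]
      cases hget : PySem.List.pyGet? boxes box with
      | none => rw [loopB_cons_none hbox hget]
      | some keys =>
        rw [loopB_cons_some hbox hget]
        have hlt := unseen_add_lt (valid_of_pyGet?_some hget) hbox
        exact ih.2 boxes keys (PySem.Set.add memo box) rest (by omega)
    refine ⟨hF, ?_⟩
    intro boxes ks
    induction ks with
    | nil => intro memo rest _; simp [openBoxKeys]
    | cons k ks ihk =>
      intro memo rest hfuel
      simp only [openBoxKeys]
      rw [List.cons_append]
      by_cases hk : k ∈ memo
      · rw [if_pos hk, ihk memo rest hfuel, loopB_cons_mem hk]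
      · rw [if_neg hk]
        have hsub : ∀ x ∈ memo, x ∈ openBoxF (f + 1) boxes k memo :=
          fun x hx => (mem_openBoxF_and_keys (f + 1)).1 boxes k memo x hx
        have hfuel' : unseen boxes (openBoxF (f + 1) boxes k memo) + 1 ≤ f + 1 := by
          have := unseen_mono (boxes := boxes) hsub
          omega
        rw [ihk _ rest hfuel']
        exact hF boxes k memo (ks ++ rest) hk hfuel

-- ===== VERDICT (by name: the statement is the Claim_ definition above) =====
theorem openBox_spec : Claim_equal_openBox := by
  intro boxes box memo _
  unfold Spec_openBox openBox openBox_alt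
  simp only [openBoxF]
  cases hget : PySem.List.pyGet? boxes box with
  | none => rfl
  | some keys =>
    have hfuel : unseen boxes (PySem.Set.add memo box) + 1 ≤ 2 * boxes.length + 1 := by
      have h1 : unseen boxes (PySem.Set.add memo box) ≤ (validBoxes boxes).length :=
        List.countP_le_length
      have hlen : (validBoxes boxes).length = 2 * boxes.length := by
        simp [validBoxes]
      omega
    have hsim := (sim (2 * boxes.length + 1)).2 boxes keys (PySem.Set.add memo box) [] hfuel
    rw [loopB_nil, List.append_nil] at hsim
    simpa using hsim
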